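-- pv_equiv track=rewrite | github.com/marcnunezc/AdventOfCode | Day23/day_23.py | get_dest
-- ===== SOURCE A (Python) =====
-- def get_dest(current_cup, pick_up, this_dict):
--     guess = current_cup-1
--     while guess > 0:
--         if guess in pick_up:
--             guess -= 1
--         else:
--             return guess
--     current_max = max(this_dict.keys())
--     removed_max = []
--     while (current_max in pick_up):
--         removed_max.append([current_max, this_dict[current_max]])
--         this_dict.pop(current_max)
--         current_max = max(this_dict.keys())
--     for key, value in removed_max:
--         this_dict[key] = value
--     return current_max
-- ===== SOURCE B (Python) =====
-- def get_dest(current_cup, pick_up, this_dict):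
--     forbidden = set(pick_up)
--     guess = current_cup - 1
--     while guess > 0 and guess in forbidden:
--         guess -= 1
--     if guess > 0:
--         return guess
--     return max(k for k in this_dict if k not in forbidden)
-- ===== Notes on version B (the rewrite author's own statement) =====
-- stated objective: simpler
-- what changed: B replaces A's mutate-pop-restore second phase on the dict with a single max over the keys not in pick_up, and hoists pick_up into a set; B does not mutate this_dict (A temporarily pops and reinserts maxima, which can reorder the dict), the return value is unchanged.
import Mathlib
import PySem

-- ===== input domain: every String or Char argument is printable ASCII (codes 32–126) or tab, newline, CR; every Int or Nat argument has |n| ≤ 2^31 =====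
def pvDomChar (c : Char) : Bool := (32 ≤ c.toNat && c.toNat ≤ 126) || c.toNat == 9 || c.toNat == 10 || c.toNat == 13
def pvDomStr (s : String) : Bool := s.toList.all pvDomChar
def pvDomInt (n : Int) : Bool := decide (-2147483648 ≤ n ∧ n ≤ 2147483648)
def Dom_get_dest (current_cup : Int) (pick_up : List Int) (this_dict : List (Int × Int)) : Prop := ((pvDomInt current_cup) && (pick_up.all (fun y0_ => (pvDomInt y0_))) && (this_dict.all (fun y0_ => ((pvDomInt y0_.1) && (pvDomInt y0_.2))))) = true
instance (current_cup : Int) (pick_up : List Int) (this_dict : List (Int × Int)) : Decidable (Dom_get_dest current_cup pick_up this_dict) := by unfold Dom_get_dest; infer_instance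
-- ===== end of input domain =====

-- B replaces A's mutate-pop-restore second phase with one max over the keys not in pick_up (simpler);
-- equivalence is about the RETURN value: A temporarily pops and reinserts dict entries (which can
-- reorder this_dict), B does not mutate it.

-- ===== PORT A =====
-- while guess > 0: if guess in pick_up: guess -= 1 else: return guess   (none = fell through)
def destLoopA (pick_up : List Int) (guess : Int) : Option Int :=
  if 0 < guess then
    if guess ∈ pick_up then destLoopA pick_up (guess - 1) else some guess
  else none
termination_by guess.toNat
decreasing_by omega

-- max(d.keys()) of the assoc-list dict (none = ValueError on empty dict)
def maxKeyA (d : List (Int × Int)) : Option Int := PySem.List.max? (d.map (·.1)) (fun x => x)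

-- the pop-max-while-in-pick_up loop; 'removed' mirrors A's removed_max list (dead for the return
-- value, kept for faithfulness); fuel is a totality guard only (unreachable branch returns 0);
-- dict.pop(cm) is ported as filtering the key out of the assoc list (exact: dict keys are unique)
def destDropA (pick_up : List Int) : Nat → List (Int × Int) → List (Int × Int) → Int → Int
  | fuel, d, removed, cm =>
    if cm ∈ pick_up then
      match fuel with
      | 0 => 0
      | fuel + 1 =>
        let removed' := removed ++ [(cm, (((d.find? (fun p => p.1 == cm)).map (·.2)).getD 0))]
        let d' := d.filter (fun p => decide (p.1 ≠ cm))
        match maxKeyA d' with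
        | some cm' => destDropA pick_up fuel d' removed' cm'
        | none => 0  -- Python raises ValueError here (excluded by Pre_)
    else cm

def get_dest (current_cup : Int) (pick_up : List Int) (this_dict : List (Int × Int)) : Int :=
  match destLoopA pick_up (current_cup - 1) with
  | some g => g
  | none =>
    match maxKeyA this_dict with
    | some cm => destDropA pick_up this_dict.length this_dict [] cm
    | none => 0  -- Python raises ValueError here (excluded by Pre_)

-- ===== PORT B =====
-- while guess > 0 and guess in forbidden: guess -= 1
def destLoopB (forbidden : List Int) (guess : Int) : Int :=
  if 0 < guess ∧ guess ∈ forbidden then destLoopB forbidden (guess - 1) else guess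
termination_by guess.toNat
decreasing_by omega

def get_dest_alt (current_cup : Int) (pick_up : List Int) (this_dict : List (Int × Int)) : Int :=
  let forbidden : PySem.Set Int := PySem.Set.ofList pick_up
  let g := destLoopB forbidden (current_cup - 1)
  if 0 < g then g
  else
    match PySem.List.max? ((this_dict.map (·.1)).filter (fun k => decide (k ∉ forbidden))) (fun x => x) with
    | some m => m
    | none => 0  -- Python raises ValueError here (excluded by Pre_)

-- ===== PRECONDITION & SPEC =====
-- Pre_ excludes exactly the inputs on which A raises ValueError (max() of an empty sequence):
-- those where the countdown from current_cup-1 finds no positive cup outside pick_up AND the dict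
-- has no key outside pick_up.  (The countdown succeeds iff some cup in the last pick_up.length+1
-- values below current_cup is positive and outside pick_up, since pick_up can block at most
-- pick_up.length values.)  B raises ValueError on the same inputs.
def Pre_get_dest (current_cup : Int) (pick_up : List Int) (this_dict : List (Int × Int)) : Prop :=
  (∃ g ∈ PySem.List.pyRange (current_cup - 1 - pick_up.length) current_cup 1, 0 < g ∧ g ∉ pick_up)
  ∨ (∃ p ∈ this_dict, p.1 ∉ pick_up)
instance (current_cup : Int) (pick_up : List Int) (this_dict : List (Int × Int)) : Decidable (Pre_get_dest current_cup pick_up this_dict) := by unfold Pre_get_dest; infer_instance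

def pvWitness_get_dest : Int × List Int × (List (Int × Int)) := (10, [9, 8], [(1, 2), (3, 4)])

def Spec_get_dest (current_cup : Int) (pick_up : List Int) (this_dict : List (Int × Int)) (out : Int) : Prop := out = get_dest_alt current_cup pick_up this_dict
instance (current_cup : Int) (pick_up : List Int) (this_dict : List (Int × Int)) (out : Int) : Decidable (Spec_get_dest current_cup pick_up this_dict out) := by unfold Spec_get_dest; infer_instance

-- ===== CLAIM (what is proved, stated in full; the proofs are below) =====
def Claim_equal_get_dest : Prop := ∀ (current_cup : Int) (pick_up : List Int) (this_dict : List (Int × Int)), Dom_get_dest current_cup pick_up this_dict → Pre_get_dest current_cup pick_up this_dict → Spec_get_dest current_cup pick_up this_dict (get_dest current_cup pick_up this_dict)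

-- ===== LEMMAS AND PROOFS =====

theorem destLoopA_eq (pick_up : List Int) (g : Int) :
    destLoopA pick_up g =
      if 0 < destLoopB (PySem.Set.ofList pick_up) g then
        some (destLoopB (PySem.Set.ofList pick_up) g) else none := by
  fun_induction destLoopA pick_up g with
  | case1 g hpos hmem ih =>
      have hb : destLoopB (PySem.Set.ofList pick_up) g = destLoopB (PySem.Set.ofList pick_up) (g - 1) := by
        rw [destLoopB, if_pos]
        exact ⟨hpos, (PySem.Set.mem_ofList _ _).2 hmem⟩
      rw [hb]; exact ih
  | case2 g hpos hmem =>
      rw [destLoopB]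
      have : ¬ (0 < g ∧ g ∈ PySem.Set.ofList pick_up) := by
        simp [PySem.Set.mem_ofList]; intro _; simpa using hmem
      rw [if_neg this, if_pos hpos]
  | case3 g hpos =>
      rw [destLoopB]
      have : ¬ (0 < g ∧ g ∈ PySem.Set.ofList pick_up) := by tauto
      rw [if_neg this, if_neg hpos]


theorem destLoopB_pos (pick_up : List Int) (g g' : Int)
    (h1 : 0 < g') (h2 : g' ≤ g) (h3 : g' ∉ pick_up) :
    0 < destLoopB (PySem.Set.ofList pick_up) g := by
  fun_induction destLoopB (PySem.Set.ofList pick_up) g with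
  | case1 g h ih =>
      apply ih
      rcases h with ⟨hg, hmem⟩
      rw [PySem.Set.mem_ofList] at hmem
      have : g' ≠ g := fun e => h3 (e ▸ hmem)
      omega
  | case2 g h =>
      rw [not_and_or] at h
      rcases h with h | h
      · omega
      · rw [PySem.Set.mem_ofList] at h
        -- g ∉ pick_up; but we need 0 < g... from g' ≤ g, 0 < g'
        omega

theorem filterF_filter_ne (pick_up : List Int) (cm : Int) (hcm : cm ∈ pick_up) (l : List Int) :
    (l.filter (fun k => decide (k ≠ cm))).filter (fun k => decide (k ∉ pick_up))
      = l.filter (fun k => decide (k ∉ pick_up)) := by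
  rw [List.filter_filter]
  congr 1
  funext k
  by_cases hk : k ∈ pick_up
  · simp [hk]
  · have : k ≠ cm := fun e => hk (e ▸ hcm)
    simp [hk, this]


theorem destDropA_eq (pick_up : List Int) (fuel : Nat) (d : List (Int × Int))
    (removed : List (Int × Int)) (cm m : Int)
    (hfuel : d.length ≤ fuel)
    (hcm : maxKeyA d = some cm)
    (hm : PySem.List.max? ((d.map (·.1)).filter (fun k => decide (k ∉ pick_up))) (fun x => x) = some m) :
    destDropA pick_up fuel d removed cm = m := by
  induction fuel generalizing d removed cm with
  | zero =>
      -- fuel = 0 but d nonempty: contradiction with hfuel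
      exfalso
      have hmem : cm ∈ d.map (·.1) := PySem.List.max?_mem hcm
      have : d ≠ [] := by rintro rfl; simp at hmem
      have : 0 < d.length := List.length_pos_iff.mpr this
      omega
  | succ f ih =>
      rw [destDropA]
      by_cases hin : cm ∈ pick_up
      · rw [if_pos hin]
        simp only
        set d' := d.filter (fun p => decide (p.1 ≠ cm)) with hd'
        have hF : (d'.map (·.1)).filter (fun k => decide (k ∉ pick_up))
            = (d.map (·.1)).filter (fun k => decide (k ∉ pick_up)) := by
          have hmf : d'.map (·.1) = (d.map (·.1)).filter (fun k => decide (k ≠ cm)) := by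
            rw [hd', List.filter_map]; rfl
          rw [hmf, filterF_filter_ne pick_up cm hin]
        have hm' : PySem.List.max? ((d'.map (·.1)).filter (fun k => decide (k ∉ pick_up))) (fun x => x) = some m := by
          rw [hF]; exact hm
        have hkeys' : d'.map (·.1) ≠ [] := by
          intro he
          have : m ∈ (d'.map (·.1)).filter (fun k => decide (k ∉ pick_up)) := PySem.List.max?_mem hm'
          rw [he] at this; simp at this
        have hlen : d'.length < d.length := by
          have hmem : cm ∈ d.map (·.1) := PySem.List.max?_mem hcm
          obtain ⟨p, hp, hpe⟩ := List.mem_map.mp hmem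
          rw [hd']
          apply List.length_filter_lt_length_iff_exists.mpr
          exact ⟨p, hp, by simp [hpe]⟩
        cases hmk : maxKeyA d' with
        | none =>
            exfalso
            rw [maxKeyA] at hmk
            have := (PySem.List.max?_eq_none_iff (d'.map (·.1)) (fun x => x)).mp hmk
            exact hkeys' this
        | some cm' =>
            exact ih d' _ cm' (by omega) hmk hm'
      · rw [if_neg hin]
        -- cm is the max key and cm ∉ pick_up, so cm is the max of the filtered keys = m
        have hmemk : cm ∈ d.map (·.1) := PySem.List.max?_mem hcm
        have hcmF : cm ∈ (d.map (·.1)).filter (fun k => decide (k ∉ pick_up)) :=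
          List.mem_filter.mpr ⟨hmemk, by simpa using hin⟩
        have h1 : cm ≤ m := PySem.List.max?_isMax hm cm hcmF
        have hmF : m ∈ (d.map (·.1)).filter (fun k => decide (k ∉ pick_up)) := PySem.List.max?_mem hm
        have hmk : m ∈ d.map (·.1) := List.mem_of_mem_filter hmF
        have h2 : m ≤ cm := PySem.List.max?_isMax hcm m hmk
        omega

-- ===== VERDICT (by name: the statement is the Claim_ definition above) =====
theorem get_dest_spec : Claim_equal_get_dest := by
  intro cc pu d _ hpre
  unfold Spec_get_dest get_dest get_dest_alt
  rw [destLoopA_eq]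
  by_cases hg : 0 < destLoopB (PySem.Set.ofList pu) (cc - 1)
  · rw [if_pos hg]
    simp only [if_pos hg]
  · rw [if_neg hg]
    simp only [if_neg hg]
    -- A's phase-1 loop fell through; the first disjunct of Pre_ is impossible
    rcases hpre with ⟨g', hgmem, hgpos, hgnp⟩ | ⟨p, hp, hnp⟩
    · exfalso
      have hlt : g' < cc := (PySem.List.mem_pyRange_one.mp hgmem).2
      exact hg (destLoopB_pos pu (cc - 1) g' hgpos (by omega) hgnp)
    · -- B's filter over the Set equals the filter over the raw list
      have hff : (fun k => decide (k ∉ PySem.Set.ofList pu)) = (fun k => decide (k ∉ pu)) := by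
        funext k; simp [PySem.Set.mem_ofList]
      rw [hff]
      have hpF : p.1 ∈ (d.map (·.1)).filter (fun k => decide (k ∉ pu)) :=
        List.mem_filter.mpr ⟨List.mem_map.mpr ⟨p, hp, rfl⟩, by simpa using hnp⟩
      cases hm : PySem.List.max? ((d.map (·.1)).filter (fun k => decide (k ∉ pu))) (fun x => x) with
      | none =>
          exfalso
          have := (PySem.List.max?_eq_none_iff _ _).mp hm
          rw [this] at hpF; simp at hpF
      | some m =>
          cases hcm : maxKeyA d with
          | none =>
              exfalso
              rw [maxKeyA] at hcm
              have := (PySem.List.max?_eq_none_iff _ _).mp hcm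
              have : p.1 ∈ d.map (·.1) := List.mem_map.mpr ⟨p, hp, rfl⟩
              rw [‹List.map _ d = []›] at this; simp at this
          | some cm =>
              exact destDropA_eq pu d.length d [] cm m le_rfl hcm hm
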